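-- pv_equiv track=rewrite | github.com/labedu/aprender-estudar-textos | labedu-all/formatacao/rules_based.py | process_paragraph_rules
-- ===== SOURCE A (Python) =====
-- last_symbol_line = "!,.:;?)}]"
--
-- first_symbol_line = "({["
--
-- def ch_split(ch):
--   if ch in first_symbol_line:
--     return ['\n',ch]
--   elif ch in last_symbol_line:
--     return [ch, '\n']
--   #else:
--   return [ch]
--
-- def process_paragraph_rules(sent):
--   sent = sent.strip()
--   sent = sent.replace('\n', ' ')
--   sent = sent.replace('  ', '')
--
--   sent2 =  ''.join([s for s in sent for s in ch_split(s)])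
--   sent2 = sent2.replace('\n ','\n')
--   sent2 = sent2.strip()
--
--   return sent2
-- ===== SOURCE B (Python) =====
-- _OPENERS = "({["
-- _CLOSERS = "!,.:;?)}]"
--
-- def process_paragraph_rules(sent):
--     s = sent.strip()
--     s = s.replace('\n', ' ')
--     s = s.replace('  ', '')
--     for c in _OPENERS:
--         s = s.replace(c, '\n' + c)
--     for c in _CLOSERS:
--         s = s.replace(c, c + '\n')
--     return s.replace('\n ', '\n').strip()
-- ===== Notes on version B (the rewrite author's own statement) =====
-- stated objective: idiomatic
-- what changed: Replaces the per-character ch_split/comprehension join by twelve whole-string str.replace substitutions, one per punctuation character (prepend a newline to each opener, append one to each closer).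
import Mathlib
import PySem

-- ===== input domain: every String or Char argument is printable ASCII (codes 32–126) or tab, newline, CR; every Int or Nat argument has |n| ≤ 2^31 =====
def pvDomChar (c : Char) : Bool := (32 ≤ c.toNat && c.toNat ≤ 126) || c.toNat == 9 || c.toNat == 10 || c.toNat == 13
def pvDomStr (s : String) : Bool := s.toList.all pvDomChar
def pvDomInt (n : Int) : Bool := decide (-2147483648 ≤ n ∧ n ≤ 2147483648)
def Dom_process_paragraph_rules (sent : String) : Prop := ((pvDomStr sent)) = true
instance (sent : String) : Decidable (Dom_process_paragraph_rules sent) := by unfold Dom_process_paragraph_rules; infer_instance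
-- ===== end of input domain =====

-- B replaces the per-character ch_split comprehension by twelve whole-string single-character
-- substitutions (one str.replace per punctuation mark); objective: idiomatic. Same return value.

-- ===== PORT A =====
def ch_split (ch : Char) : List Char :=
  if "({[".toList.contains ch then ['\n', ch]
  else if "!,.:;?)}]".toList.contains ch then [ch, '\n']
  else [ch]

def process_paragraph_rules (sent : String) : String :=
  let s1 := PySem.Chars.strip sent.toList
  let s2 := PySem.Chars.replace s1 ['\n'] [' ']
  let s3 := PySem.Chars.replace s2 [' ', ' '] []
  let j  := s3.flatMap ch_split
  let j2 := PySem.Chars.replace j ['\n', ' '] ['\n']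
  String.ofList (PySem.Chars.strip j2)

-- ===== PORT B =====
def process_paragraph_rules_alt (sent : String) : String :=
  let s1 := PySem.Chars.strip sent.toList
  let s2 := PySem.Chars.replace s1 ['\n'] [' ']
  let s3 := PySem.Chars.replace s2 [' ', ' '] []
  let s4 := "({[".toList.foldl (fun s c => PySem.Chars.replace s [c] ['\n', c]) s3
  let s5 := "!,.:;?)}]".toList.foldl (fun s c => PySem.Chars.replace s [c] [c, '\n']) s4
  let s6 := PySem.Chars.replace s5 ['\n', ' '] ['\n']
  String.ofList (PySem.Chars.strip s6)

-- ===== PRECONDITION & SPEC =====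
def Spec_process_paragraph_rules (sent : String) (out : String) : Prop := out = process_paragraph_rules_alt sent
instance (sent : String) (out : String) : Decidable (Spec_process_paragraph_rules sent out) := by unfold Spec_process_paragraph_rules; infer_instance

-- ===== CLAIM (what is proved, stated in full; the proofs are below) =====
def Claim_equal_process_paragraph_rules : Prop := ∀ (sent : String), Dom_process_paragraph_rules sent → Spec_process_paragraph_rules sent (process_paragraph_rules sent)

-- ===== LEMMAS AND PROOFS =====

-- A Python `s.replace(old, new)` with a single-character `old` is the per-character flatMap.
theorem replace_go_single (c : Char) (new : List Char) :
    ∀ (l : List Char) (fuel : Nat) (acc : List Char), l.length ≤ fuel →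
    PySem.Chars.replace.go [c] new fuel l acc
      = acc.reverse ++ l.flatMap (fun d => if d == c then new else [d]) := by
  intro l
  induction l with
  | nil =>
    intro fuel acc h
    cases fuel <;> simp [PySem.Chars.replace.go]
  | cons d t ih =>
    intro fuel acc h
    cases fuel with
    | zero => simp at h
    | succ m =>
      rw [PySem.Chars.replace.go]
      by_cases hd : d = c
      · subst hd
        simp [List.isPrefixOf, ih m (new.reverse ++ acc) (by simpa using h)]
      · simp [List.isPrefixOf, Ne.symm hd, hd, ih m (d :: acc) (by simpa using h)]

theorem replace_single (s : List Char) (c : Char) (new : List Char) :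
    PySem.Chars.replace s [c] new = s.flatMap (fun d => if d == c then new else [d]) := by
  simp [PySem.Chars.replace, replace_go_single c new s s.length [] (le_refl _)]

-- The twelve single-character substitutions of B compose to A's ch_split pass.
theorem chain_eq_chsplit (s : List Char) :
    "!,.:;?)}]".toList.foldl (fun s c => PySem.Chars.replace s [c] [c, '\n'])
      ("({[".toList.foldl (fun s c => PySem.Chars.replace s [c] ['\n', c]) s)
      = s.flatMap ch_split := by
  have e1 : "({[".toList = ['(', '{', '['] := rfl
  have e2 : "!,.:;?)}]".toList = ['!', ',', '.', ':', ';', '?', ')', '}', ']'] := rfl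
  rw [e1, e2]
  simp only [List.foldl_cons, List.foldl_nil, replace_single, List.flatMap_assoc]
  congr 1
  funext d
  by_cases h1 : d = '(';  · subst h1; rfl
  by_cases h2 : d = '{';  · subst h2; rfl
  by_cases h3 : d = '[';  · subst h3; rfl
  by_cases h4 : d = '!';  · subst h4; rfl
  by_cases h5 : d = ',';  · subst h5; rfl
  by_cases h6 : d = '.';  · subst h6; rfl
  by_cases h7 : d = ':';  · subst h7; rfl
  by_cases h8 : d = ';';  · subst h8; rfl
  by_cases h9 : d = '?';  · subst h9; rfl
  by_cases h10 : d = ')'; · subst h10; rfl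
  by_cases h11 : d = '}'; · subst h11; rfl
  by_cases h12 : d = ']'; · subst h12; rfl
  simp [ch_split, h1, h2, h3, h4, h5, h6, h7, h8, h9, h10, h11, h12]

-- ===== VERDICT (by name: the statement is the Claim_ definition above) =====
theorem process_paragraph_rules_spec : Claim_equal_process_paragraph_rules := by
  intro sent _
  unfold Spec_process_paragraph_rules process_paragraph_rules process_paragraph_rules_alt
  dsimp only
  rw [chain_eq_chsplit]
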